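-- pv_equiv track=rewrite | github.com/Incede-Technologies-ai/i2iOcrBackend | target/classes/com/I2I/I2IBaceknd/extract_text.py | grid_to_text
-- ===== SOURCE A (Python) =====
-- def grid_to_text(grid, original_dimensions):
--     """
--     Converts the grid back to text while preserving spatial relationships
--     """
--     min_x, max_x, min_y, max_y = original_dimensions
--     grid_rows, grid_cols = len(grid), len(grid[0])
--
--     output_lines = []
--     current_line = []
--     prev_row_has_content = False
--
--     for row in range(grid_rows):
--         row_has_content = any(grid[row][col] for col in range(grid_cols))
--
--         if row_has_content:
--             # Process columns in this row
--             line_parts = []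
--             for col in range(grid_cols):
--                 if grid[row][col]:
--                     line_parts.append(grid[row][col])
--
--             # Add line to output
--             output_lines.append('  '.join(line_parts))  # Double space between columns
--
--             prev_row_has_content = True
--         elif prev_row_has_content:
--             # Add empty line only if previous row had content
--             output_lines.append('')
--             prev_row_has_content = False
--
--     return '\n'.join(output_lines)
-- ===== SOURCE B (Python) =====
-- def grid_to_text(grid, original_dimensions):
--     """
--     Converts the grid back to text while preserving spatial relationships
--     """
--     min_x, max_x, min_y, max_y = original_dimensions
--     grid_rows, grid_cols = len(grid), len(grid[0])
--
--     # Phase 1: locate the rows that carry content.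
--     content = [r for r in range(grid_rows)
--                if any(grid[r][c] for c in range(grid_cols))]
--     if not content:
--         return ''
--
--     def line(r):
--         return '  '.join(grid[r][c] for c in range(grid_cols) if grid[r][c])
--
--     # Phase 2: rebuild by index arithmetic: a blank line wherever two
--     # content rows are separated by a gap, and one trailing blank line
--     # if the last content row is not the last grid row.
--     out = [line(content[0])]
--     for prev, r in zip(content, content[1:]):
--         if r > prev + 1:
--             out.append('')
--         out.append(line(r))
--     if content[-1] < grid_rows - 1:
--         out.append('')
--     return '\n'.join(out)
-- ===== Notes on version B (the rewrite author's own statement) =====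
-- stated objective: alternative
-- what changed: Replaces A's stateful single pass with a prev_row_has_content flag by a two-phase index-arithmetic reconstruction: first collect the indices of content rows, then emit their joined texts inserting a blank line exactly where consecutive content indices have a gap and a trailing blank if the last content index precedes the last row.
import Mathlib
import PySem

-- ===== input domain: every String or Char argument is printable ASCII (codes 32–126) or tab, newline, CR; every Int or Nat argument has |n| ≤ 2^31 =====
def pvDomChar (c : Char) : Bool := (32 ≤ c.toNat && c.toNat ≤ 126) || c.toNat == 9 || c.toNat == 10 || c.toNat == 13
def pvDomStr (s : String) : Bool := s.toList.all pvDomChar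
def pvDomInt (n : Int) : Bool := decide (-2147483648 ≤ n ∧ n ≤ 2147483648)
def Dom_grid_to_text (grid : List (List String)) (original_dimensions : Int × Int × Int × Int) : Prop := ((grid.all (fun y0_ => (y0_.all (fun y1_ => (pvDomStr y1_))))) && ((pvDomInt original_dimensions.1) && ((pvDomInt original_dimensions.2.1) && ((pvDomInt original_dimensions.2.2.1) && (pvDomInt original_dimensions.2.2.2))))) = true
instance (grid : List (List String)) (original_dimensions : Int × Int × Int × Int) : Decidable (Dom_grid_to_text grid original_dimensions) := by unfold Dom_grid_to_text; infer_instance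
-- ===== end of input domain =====

-- B replaces A's stateful prev-flag row loop by a two-phase index-arithmetic reconstruction
-- (collect content-row indices, then emit with gap/trailing blanks); equality of RETURN values
-- is proved on Pre_ (A raises elsewhere).

-- ===== PORT A =====
def grid_to_text (grid : List (List String)) (original_dimensions : Int × Int × Int × Int) : String :=
  let _min_x := original_dimensions.1
  let _max_x := original_dimensions.2.1
  let _min_y := original_dimensions.2.2.1
  let _max_y := original_dimensions.2.2.2
  let grid_rows : Int := PySem.List.len grid
  let grid_cols : Int := PySem.List.len (PySem.List.pyGetD grid 0 [])
  -- state = (output_lines, prev_row_has_content)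
  let st : List String × Bool :=
    (PySem.List.pyRange 0 grid_rows 1).foldl (fun st row =>
      let r := PySem.List.pyGetD grid row []
      let row_has_content := (PySem.List.pyRange 0 grid_cols 1).any
        (fun col => !(PySem.List.pyGetD r col "" == ""))
      if row_has_content then
        let line_parts := (PySem.List.pyRange 0 grid_cols 1).foldl (fun acc col =>
          if PySem.List.pyGetD r col "" ≠ "" then acc ++ [PySem.List.pyGetD r col ""] else acc) []
        (st.1 ++ [PySem.Str.join "  " line_parts], true)
      else if st.2 then (st.1 ++ [""], false)
      else st) ([], false)
  PySem.Str.join "\n" st.1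

-- ===== PORT B =====
def grid_to_text_alt (grid : List (List String)) (original_dimensions : Int × Int × Int × Int) : String :=
  let _min_x := original_dimensions.1
  let _max_x := original_dimensions.2.1
  let _min_y := original_dimensions.2.2.1
  let _max_y := original_dimensions.2.2.2
  let grid_rows : Int := PySem.List.len grid
  let grid_cols : Int := PySem.List.len (PySem.List.pyGetD grid 0 [])
  -- Phase 1: the indices of rows that carry content
  let content : List Int := (PySem.List.pyRange 0 grid_rows 1).filter
    (fun r => (PySem.List.pyRange 0 grid_cols 1).any
      (fun c => !(PySem.List.pyGetD (PySem.List.pyGetD grid r []) c "" == "")))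
  match content with
  | [] => ""
  | c0 :: rest =>
    let line : Int → String := fun r =>
      PySem.Str.join "  " (((PySem.List.pyRange 0 grid_cols 1).filter
        (fun c => !(PySem.List.pyGetD (PySem.List.pyGetD grid r []) c "" == ""))).map
        (fun c => PySem.List.pyGetD (PySem.List.pyGetD grid r []) c ""))
    -- Phase 2: emit, inserting blanks where consecutive content indices have a gap
    let out := ((c0 :: rest).zip rest).foldl
      (fun out pr => (out ++ (if pr.2 > pr.1 + 1 then [""] else [])) ++ [line pr.2]) [line c0]
    -- content[-1] on this (nonempty) list is its last element
    let out := if (c0 :: rest).getLast (by simp) < grid_rows - 1 then out ++ [""] else out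
    PySem.Str.join "\n" out

-- ===== PRECONDITION & SPEC =====
-- Pre_ excludes exactly the inputs where the Python A raises IndexError: the empty grid
-- (len(grid[0])) and grids with a row shorter than the first row (grid[row][col]).
def Pre_grid_to_text (grid : List (List String)) (original_dimensions : Int × Int × Int × Int) : Prop :=
  grid ≠ [] ∧ ∀ r ∈ grid, (grid.headD []).length ≤ r.length
instance (grid : List (List String)) (original_dimensions : Int × Int × Int × Int) : Decidable (Pre_grid_to_text grid original_dimensions) := by unfold Pre_grid_to_text; infer_instance

def pvWitness_grid_to_text : List (List String) × (Int × Int × Int × Int) :=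
  ([["ab", ""], ["", ""], ["", "c"]], (0, 3, 0, 2))

def Spec_grid_to_text (grid : List (List String)) (original_dimensions : Int × Int × Int × Int) (out : String) : Prop := out = grid_to_text_alt grid original_dimensions
instance (grid : List (List String)) (original_dimensions : Int × Int × Int × Int) (out : String) : Decidable (Spec_grid_to_text grid original_dimensions out) := by unfold Spec_grid_to_text; infer_instance

-- ===== CLAIM (what is proved, stated in full; the proofs are below) =====
def Claim_equal_grid_to_text : Prop := ∀ (grid : List (List String)) (original_dimensions : Int × Int × Int × Int), Dom_grid_to_text grid original_dimensions → Pre_grid_to_text grid original_dimensions → Spec_grid_to_text grid original_dimensions (grid_to_text grid original_dimensions)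

-- ===== LEMMAS AND PROOFS =====

-- row text shared by both characterisations
def pvRowText (cols : Nat) (row : List String) : String :=
  PySem.Str.join "  " ((row.take cols).filter (fun s => !(s == "")))

-- step function of A's row loop, abstracted over the row's joined text
def pvStep (st : List String × Bool) (t : String) : List String × Bool :=
  if t ≠ "" then (st.1 ++ [t], true) else if st.2 then (st.1 ++ [""], false) else st

mutual
def pvR0 : List String → List String
  | [] => []
  | t :: ts => if t = "" then pvR0 ts else t :: pvR1 ts
def pvR1 : List String → List String
  | [] => []
  | t :: ts => if t = "" then "" :: pvR0 ts else t :: pvR1 ts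
end

lemma foldl_pvStep (ts : List String) (acc : List String) (b : Bool) :
    (ts.foldl pvStep (acc, b)).1 = acc ++ (if b then pvR1 ts else pvR0 ts) := by
  induction ts generalizing acc b with
  | nil => cases b <;> simp [pvR0, pvR1]
  | cons t ts ih =>
    by_cases ht : t = "" <;> cases b <;>
      simp [pvStep, ht, pvR0, pvR1, ih, List.append_assoc]

lemma map_pyGetD_range_take (r : List String) (c : Nat) (h : c ≤ r.length) :
    (PySem.List.pyRange 0 (c : Int) 1).map (fun col => PySem.List.pyGetD r col "") = r.take c := by
  rw [PySem.List.pyRange_zero_nat, List.map_map]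
  apply List.ext_getElem
  · simp [Nat.min_eq_left h]
  · intro i h1 h2
    simp at h1
    simp [PySem.List.pyGetD_natCast, List.getD_eq_getElem?_getD,
      List.getElem?_eq_getElem (by omega : i < r.length)]

lemma join_ne_empty (sep : String) (parts : List String)
    (hne : parts ≠ []) (hall : ∀ x ∈ parts, x ≠ "") : PySem.Str.join sep parts ≠ "" := by
  intro hjoin
  have h1 : (PySem.Str.join sep parts).toList = [] := by rw [hjoin]; rfl
  rw [PySem.Str.toList_join] at h1
  match parts, hne with
  | [x], _ =>
    simp [PySem.Chars.join_singleton] at h1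
    exact hall x (by simp) (by cases x; simpa using h1)
  | x :: y :: rest, _ =>
    simp only [List.map_cons, PySem.Chars.join_cons_cons] at h1
    simp at h1
    exact hall x (by simp) (by cases x; simpa using h1.1)

lemma rowA_parts (r : List String) (c : Nat) (h : c ≤ r.length) :
    (PySem.List.pyRange 0 (c:Int) 1).foldl
      (fun acc col => if PySem.List.pyGetD r col "" ≠ "" then acc ++ [PySem.List.pyGetD r col ""] else acc) []
    = (r.take c).filter (fun s => !(s == "")) := by
  rw [PySem.List.foldl_append_ite (p := fun col => PySem.List.pyGetD r col "" ≠ "")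
    (f := fun col => PySem.List.pyGetD r col "")]
  rw [← map_pyGetD_range_take r c h, List.filter_map]
  simp only [Function.comp_def, List.nil_append]
  congr 1
  apply List.filter_congr
  intro x _
  by_cases hx : PySem.List.pyGetD r x "" = "" <;> simp [hx]

lemma rowA_any (r : List String) (c : Nat) (h : c ≤ r.length) :
    (PySem.List.pyRange 0 (c:Int) 1).any (fun col => !(PySem.List.pyGetD r col "" == ""))
    = (r.take c).any (fun s => !(s == "")) := by
  rw [← map_pyGetD_range_take r c h, List.any_map]
  rfl

lemma any_iff_join_ne (ps : List String) :
    (ps.any (fun s => !(s == "")) = true) ↔ PySem.Str.join "  " (ps.filter (fun s => !(s == ""))) ≠ "" := by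
  constructor
  · intro ha
    apply join_ne_empty
    · simp only [ne_eq, List.filter_eq_nil_iff]
      simp only [List.any_eq_true] at ha
      obtain ⟨x, hx, hpx⟩ := ha
      intro hall
      exact absurd hpx (by simpa using hall x hx)
    · intro x hx
      have := List.of_mem_filter hx
      simpa using this
  · intro hj
    by_contra ha
    simp only [List.any_eq_true, not_exists, not_and] at ha
    have : ps.filter (fun s => !(s == "")) = [] := by
      rw [List.filter_eq_nil_iff]
      intro x hx
      simpa using ha x hx
    rw [this] at hj
    exact hj rfl

-- A's result is '\n'-join of pvR0 of the per-row texts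
lemma A_eq (g0 : List String) (gs : List (List String)) (od : Int × Int × Int × Int)
    (hrows : ∀ r ∈ g0 :: gs, g0.length ≤ r.length) :
    grid_to_text (g0 :: gs) od
      = PySem.Str.join "\n" (pvR0 ((g0 :: gs).map (pvRowText g0.length))) := by
  unfold grid_to_text
  simp only [PySem.List.pyGetD_zero_cons, PySem.List.len_eq]
  rw [PySem.List.foldl_pyRange_zero_pyGetD' (g0 :: gs) ([] : List String)
      (f := fun st r =>
        if ((PySem.List.pyRange 0 ((g0.length : Int)) 1).any fun col => !(PySem.List.pyGetD r col "" == "")) = true then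
          (st.1 ++ [PySem.Str.join "  " ((PySem.List.pyRange 0 ((g0.length : Int)) 1).foldl
              (fun acc col => if PySem.List.pyGetD r col "" ≠ "" then acc ++ [PySem.List.pyGetD r col ""] else acc) [])], true)
        else if st.2 = true then (st.1 ++ [""], false) else st)
      (init := (([] : List String), false))]
  rw [PySem.List.foldl_congr_mem (g0 :: gs) _
      (fun st r => pvStep st (pvRowText g0.length r))
      (([] : List String), false)
      (by
        intro st r hr
        have hc : g0.length ≤ r.length := hrows r hr
        rw [rowA_parts r g0.length hc, rowA_any r g0.length hc]
        unfold pvStep pvRowText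
        by_cases hany : (r.take g0.length).any (fun s => !(s == "")) = true
        · rw [if_pos hany]
          exact (if_pos ((any_iff_join_ne _).1 hany)).symm
        · rw [if_neg hany]
          exact (if_neg (fun hcontra => hany ((any_iff_join_ne _).2 hcontra))).symm)]
  rw [← List.foldl_map, foldl_pvStep]
  simp

-- ===== B-side machinery: content indices and gap-based emission =====

def pvIdx (ts : List String) : List Nat :=
  (List.range ts.length).filter (fun i => !(ts.getD i "" == ""))

def pvEmit (ts : List String) : Nat → List Nat → List String
  | p, [] => if p + 1 < ts.length then [""] else []
  | p, c :: cs => (if p + 1 < c then [""] else []) ++ ts.getD c "" :: pvEmit ts c cs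

def pvEmitStart (ts : List String) : List Nat → List String
  | [] => if 0 < ts.length then [""] else []
  | c :: cs => (if 0 < c then [""] else []) ++ ts.getD c "" :: pvEmit ts c cs

def pvBuild (ts : List String) : List String :=
  match pvIdx ts with
  | [] => []
  | c0 :: cs => ts.getD c0 "" :: pvEmit ts c0 cs

lemma pvIdx_cons (t : String) (ts : List String) :
    pvIdx (t :: ts) = (if t = "" then [] else [0]) ++ (pvIdx ts).map (· + 1) := by
  unfold pvIdx
  rw [List.length_cons, List.range_succ_eq_map, List.filter_cons, List.filter_map]
  by_cases ht : t = "" <;> simp [ht, Function.comp_def]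

lemma pvIdx_lt (ts : List String) (i : Nat) (h : i ∈ pvIdx ts) : i < ts.length := by
  unfold pvIdx at h
  have := List.mem_of_mem_filter h
  simpa using this

lemma pvEmit_shift (t : String) (ts : List String) (p : Nat) (cs : List Nat) :
    pvEmit (t :: ts) (p + 1) (cs.map (· + 1)) = pvEmit ts p cs := by
  induction cs generalizing p with
  | nil =>
    simp only [pvEmit, List.map_nil, List.length_cons]
    split_ifs with h1 h2 h2 <;> first | rfl | omega
  | cons c cs ih =>
    simp only [pvEmit, List.map_cons, List.getD_cons_succ]
    rw [ih c]
    congr 1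
    split_ifs with h1 h2 h2 <;> first | rfl | omega

lemma pvEmit_zero (t : String) (ts : List String) (cs : List Nat) :
    pvEmit (t :: ts) 0 (cs.map (· + 1)) = pvEmitStart ts cs := by
  cases cs with
  | nil =>
    simp only [pvEmit, pvEmitStart, List.map_nil, List.length_cons]
    split_ifs with h1 h2 h2 <;> first | rfl | omega
  | cons c cs =>
    simp only [pvEmit, pvEmitStart, List.map_cons, List.getD_cons_succ]
    rw [pvEmit_shift]
    congr 1
    split_ifs with h1 h2 h2 <;> first | rfl | omega

lemma pvBuild_cons_empty (ts : List String) : pvBuild ("" :: ts) = pvBuild ts := by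
  unfold pvBuild
  cases h : pvIdx ts with
  | nil => rw [pvIdx_cons]; simp [h]
  | cons c0 cs => rw [pvIdx_cons]; simp [h, pvEmit_shift]

lemma pvEmitStart_cons_empty (ts : List String) :
    pvEmitStart ("" :: ts) (pvIdx ("" :: ts)) = "" :: pvBuild ts := by
  unfold pvBuild
  cases h : pvIdx ts with
  | nil => rw [pvIdx_cons]; simp [h, pvEmitStart]
  | cons c0 cs => rw [pvIdx_cons]; simp [h, pvEmitStart, pvEmit_shift]

lemma pvBuild_cons_ne (t : String) (ts : List String) (ht : t ≠ "") :
    pvBuild (t :: ts) = t :: pvEmitStart ts (pvIdx ts) := by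
  unfold pvBuild
  rw [pvIdx_cons]
  simp [ht, pvEmit_zero]

lemma pvEmitStart_cons_ne (t : String) (ts : List String) (ht : t ≠ "") :
    pvEmitStart (t :: ts) (pvIdx (t :: ts)) = t :: pvEmitStart ts (pvIdx ts) := by
  rw [pvIdx_cons]
  simp [ht, pvEmitStart, pvEmit_zero]

lemma pvBuild_eq (ts : List String) :
    pvBuild ts = pvR0 ts ∧ pvEmitStart ts (pvIdx ts) = pvR1 ts := by
  induction ts with
  | nil =>
    constructor <;> simp [pvBuild, pvIdx, pvEmitStart, pvR0, pvR1]
  | cons t ts ih =>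
    obtain ⟨ih0, ih1⟩ := ih
    by_cases ht : t = ""
    · subst ht
      refine ⟨?_, ?_⟩
      · rw [pvBuild_cons_empty, pvR0, if_pos rfl, ih0]
      · rw [pvEmitStart_cons_empty, pvR1, if_pos rfl, ih0]
    · refine ⟨?_, ?_⟩
      · rw [pvBuild_cons_ne t ts ht, pvR0, if_neg ht, ih1]
      · rw [pvEmitStart_cons_ne t ts ht, pvR1, if_neg ht, ih1]

-- Bool form of any_iff_join_ne
lemma any_eq_bnot_join (ps : List String) :
    ps.any (fun s => !(s == "")) = !(PySem.Str.join "  " (ps.filter (fun s => !(s == ""))) == "") := by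
  cases hb : ps.any (fun s => !(s == "")) with
  | true =>
    have := (any_iff_join_ne ps).1 hb
    simp [this]
  | false =>
    have : ¬ (PySem.Str.join "  " (ps.filter (fun s => !(s == ""))) ≠ "") := by
      intro h
      rw [(any_iff_join_ne ps).2 h] at hb
      cases hb
    simp only [ne_eq, not_not] at this
    simp [this]

-- the per-row column comprehension of B is filtering the truncated row
lemma rowB_line (r : List String) (c : Nat) (h : c ≤ r.length) :
    ((PySem.List.pyRange 0 (c:Int) 1).filter (fun col => !(PySem.List.pyGetD r col "" == ""))).map
      (fun col => PySem.List.pyGetD r col "")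
    = (r.take c).filter (fun s => !(s == "")) := by
  rw [← map_pyGetD_range_take r c h, List.filter_map]
  simp [Function.comp_def]

lemma getD_map_rowText (g : List (List String)) (c : Nat) (i : Nat) (h : i < g.length) :
    (g.map (pvRowText c)).getD i "" = pvRowText c g[i] := by
  simp [List.getD_eq_getElem?_getD, h]

-- B's content list is exactly pvIdx of the row texts, cast to Int
lemma content_eq (g0 : List String) (gs : List (List String))
    (hrows : ∀ r ∈ g0 :: gs, g0.length ≤ r.length) :
    ((PySem.List.pyRange 0 (((g0 :: gs).length : Nat) : Int) 1).filter
      (fun r => (PySem.List.pyRange 0 ((g0.length : Nat) : Int) 1).any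
        (fun c => !(PySem.List.pyGetD (PySem.List.pyGetD (g0 :: gs) r []) c "" == ""))))
    = (pvIdx ((g0 :: gs).map (pvRowText g0.length))).map (fun i : Nat => (i : Int)) := by
  rw [PySem.List.pyRange_zero_nat (g0 :: gs).length, List.filter_map]
  unfold pvIdx
  rw [List.length_map]
  congr 1
  apply List.filter_congr
  intro i hi
  have hilt : i < (g0 :: gs).length := by simpa using hi
  simp only [Function.comp_apply]
  rw [PySem.List.pyGetD_natCast, List.getD_eq_getElem?_getD,
    List.getElem?_eq_getElem hilt]
  simp only [Option.getD_some]
  rw [rowA_any _ g0.length (hrows _ (List.getElem_mem hilt)),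
    getD_map_rowText _ _ _ hilt, any_eq_bnot_join]
  rfl

-- the gap/trailing flatMap equals pvEmit
lemma pvZipFlat (ts : List String) (c0 : Nat) (cs : List Nat) :
    ((c0 :: cs).zip cs).flatMap
        (fun pr => (if pr.1 + 1 < pr.2 then [""] else []) ++ [ts.getD pr.2 ""])
      ++ (if ((c0 :: cs).getLast (List.cons_ne_nil _ _)) + 1 < ts.length then [""] else [])
    = pvEmit ts c0 cs := by
  induction cs generalizing c0 with
  | nil => simp [pvEmit]
  | cons c cs ih =>
    rw [List.zip_cons_cons, List.flatMap_cons,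
      List.getLast_cons (List.cons_ne_nil _ _), List.append_assoc, List.append_assoc, ih c]
    simp [pvEmit]

lemma getLast_cast (c0 : Nat) (cs : List Nat) (h : ((c0 : Int) :: cs.map (fun i : Nat => (i : Int))) ≠ []) :
    ((c0 : Int) :: cs.map (fun i : Nat => (i : Int))).getLast h
      = (((c0 :: cs).getLast (List.cons_ne_nil _ _) : Nat) : Int) :=
  List.getLast_map (f := fun i : Nat => (i : Int)) (l := c0 :: cs) h

-- B's result is '\n'-join of pvBuild of the per-row texts
lemma B_eq (g0 : List String) (gs : List (List String)) (od : Int × Int × Int × Int)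
    (hrows : ∀ r ∈ g0 :: gs, g0.length ≤ r.length) :
    grid_to_text_alt (g0 :: gs) od
      = PySem.Str.join "\n" (pvBuild ((g0 :: gs).map (pvRowText g0.length))) := by
  unfold grid_to_text_alt
  simp only [PySem.List.pyGetD_zero_cons, PySem.List.len_eq]
  rw [content_eq g0 gs hrows]
  have hline : ∀ i : Nat, i < (g0 :: gs).length →
      PySem.Str.join "  " (((PySem.List.pyRange 0 ((g0.length : Nat) : Int) 1).filter
        (fun c => !(PySem.List.pyGetD (PySem.List.pyGetD (g0 :: gs) (i : Int) []) c "" == ""))).map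
        (fun c => PySem.List.pyGetD (PySem.List.pyGetD (g0 :: gs) (i : Int) []) c ""))
      = ((g0 :: gs).map (pvRowText g0.length)).getD i "" := by
    intro i hi
    rw [PySem.List.pyGetD_natCast, List.getD_eq_getElem?_getD, List.getElem?_eq_getElem hi]
    simp only [Option.getD_some]
    rw [rowB_line _ g0.length (hrows _ (List.getElem_mem hi)), getD_map_rowText _ _ _ hi]
    rfl
  cases hI : pvIdx ((g0 :: gs).map (pvRowText g0.length)) with
  | nil =>
    simp only [List.map_nil]
    unfold pvBuild
    rw [hI]
    rfl
  | cons c0 cs =>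
    have hsub : ∀ j ∈ c0 :: cs, j < (g0 :: gs).length := by
      intro j hj
      have := pvIdx_lt _ j (hI ▸ hj)
      simpa using this
    simp only [List.map_cons]
    -- fold → flatMap
    rw [show (fun (out : List String) (pr : Int × Int) =>
          (out ++ (if pr.2 > pr.1 + 1 then [""] else [])) ++
            [PySem.Str.join "  " (((PySem.List.pyRange 0 ((g0.length : Nat) : Int) 1).filter
              (fun c => !(PySem.List.pyGetD (PySem.List.pyGetD (g0 :: gs) pr.2 []) c "" == ""))).map
              (fun c => PySem.List.pyGetD (PySem.List.pyGetD (g0 :: gs) pr.2 []) c ""))])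
        = (fun (out : List String) (pr : Int × Int) => out ++
            ((if pr.2 > pr.1 + 1 then [""] else []) ++
            [PySem.Str.join "  " (((PySem.List.pyRange 0 ((g0.length : Nat) : Int) 1).filter
              (fun c => !(PySem.List.pyGetD (PySem.List.pyGetD (g0 :: gs) pr.2 []) c "" == ""))).map
              (fun c => PySem.List.pyGetD (PySem.List.pyGetD (g0 :: gs) pr.2 []) c ""))]))
        from by funext out pr; rw [List.append_assoc]]
    rw [PySem.List.foldl_append_eq_flatMap]
    rw [getLast_cast c0 cs]
    have hcond : ((((c0 :: cs).getLast (List.cons_ne_nil _ _) : Nat) : Int) < ((g0 :: gs).length : Int) - 1)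
        ↔ ((c0 :: cs).getLast (List.cons_ne_nil _ _) + 1 < ((g0 :: gs).map (pvRowText g0.length)).length) := by
      rw [List.length_map]
      omega
    simp only [hcond]
    have hzip : ((c0 : Int) :: cs.map (fun i : Nat => (i : Int))).zip (cs.map (fun i : Nat => (i : Int)))
        = ((c0 :: cs).zip cs).map (Prod.map (fun i : Nat => (i : Int)) (fun i : Nat => (i : Int))) := by
      rw [show ((c0 : Int) :: cs.map (fun i : Nat => (i : Int))) = (c0 :: cs).map (fun i : Nat => (i : Int)) from rfl,
        List.zip_map]
    rw [hzip, List.flatMap_map]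
    rw [List.flatMap_congr (g := fun pr : Nat × Nat =>
        (if pr.1 + 1 < pr.2 then [""] else []) ++
          [((g0 :: gs).map (pvRowText g0.length)).getD pr.2 ""])
      (by
        intro pr hpr
        obtain ⟨a, b⟩ := pr
        have hb : b < (g0 :: gs).length :=
          hsub _ (List.mem_cons_of_mem _ (List.of_mem_zip hpr).2)
        have hmap : Prod.map (fun i : Nat => (i : Int)) (fun i : Nat => (i : Int)) (a, b)
            = ((a : Int), (b : Int)) := rfl
        rw [hmap]
        dsimp only
        rw [hline b hb]
        have hiff : ((a : Int) + 1 < (b : Int)) ↔ (a + 1 < b) := by omega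
        simp only [hiff])]
    rw [hline c0 (hsub c0 (by simp))]
    rw [show (pvRowText g0.length g0 :: List.map (pvRowText g0.length) gs)
        = (g0 :: gs).map (pvRowText g0.length) from rfl]
    unfold pvBuild
    rw [hI]
    show _ = PySem.Str.join "\n"
      (((g0 :: gs).map (pvRowText g0.length)).getD c0 ""
        :: pvEmit ((g0 :: gs).map (pvRowText g0.length)) c0 cs)
    rw [← pvZipFlat ((g0 :: gs).map (pvRowText g0.length)) c0 cs]
    split_ifs with h <;> simp

-- ===== VERDICT (by name: the statement is the Claim_ definition above) =====
theorem grid_to_text_spec : Claim_equal_grid_to_text := by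
  intro grid od _hdom hpre
  obtain ⟨hne, hrows⟩ := hpre
  obtain ⟨g0, gs, rfl⟩ := List.exists_cons_of_ne_nil hne
  unfold Spec_grid_to_text
  rw [A_eq g0 gs od (by simpa using hrows), B_eq g0 gs od (by simpa using hrows),
    (pvBuild_eq _).1]
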